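-- pv_equiv track=rewrite | github.com/CriticalHex/CodeQuest | radioactive_blastervium/radioactive_blastervium.py | recurse
-- ===== SOURCE A (Python) =====
-- def recurse(
--     targ_periods: int, periods: list[int], n_time_steps: int, multiplier: int = 1
-- ) -> int:
--     total: int = 0
--     if targ_periods > 1:
--         for i, period in enumerate(periods[: len(periods) - targ_periods + 1]):
--             total += recurse(
--                 targ_periods - 1,
--                 periods[i + 1 :],
--                 n_time_steps,
--                 multiplier * period,
--             )
--     else:
--         for period in periods:
--             total += int(n_time_steps / (multiplier * period))
--     return total
-- ===== SOURCE B (Python) =====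
-- import itertools
-- import math
--
--
-- def recurse(
--     targ_periods: int, periods: list[int], n_time_steps: int, multiplier: int = 1
-- ) -> int:
--     k = targ_periods if targ_periods > 1 else 1
--     if k > len(periods):
--         return 0  # no size-k subsets
--     return sum(
--         int(n_time_steps / (multiplier * math.prod(combo)))
--         for combo in itertools.combinations(periods, k)
--     )
-- ===== Notes on version B (the rewrite author's own statement) =====
-- stated objective: idiomatic
-- what changed: A's recursive descent over sliced sublists (with an accumulator loop at each level) is replaced by a single flat enumeration of the size-k index-increasing subsets via itertools.combinations with math.prod, summing int(n/(multiplier*prod)) directly.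
import Mathlib
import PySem

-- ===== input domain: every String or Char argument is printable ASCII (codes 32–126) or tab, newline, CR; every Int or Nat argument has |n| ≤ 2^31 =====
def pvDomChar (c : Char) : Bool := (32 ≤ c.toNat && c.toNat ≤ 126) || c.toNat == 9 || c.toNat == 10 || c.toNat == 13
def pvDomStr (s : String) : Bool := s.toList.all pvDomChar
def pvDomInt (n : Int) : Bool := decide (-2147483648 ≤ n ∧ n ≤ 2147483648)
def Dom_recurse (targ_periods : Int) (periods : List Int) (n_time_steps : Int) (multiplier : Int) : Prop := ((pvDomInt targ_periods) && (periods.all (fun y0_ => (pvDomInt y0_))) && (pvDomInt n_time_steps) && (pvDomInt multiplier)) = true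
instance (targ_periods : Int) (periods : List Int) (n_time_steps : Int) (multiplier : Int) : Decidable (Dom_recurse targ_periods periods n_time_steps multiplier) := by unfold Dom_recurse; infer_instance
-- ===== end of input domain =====

-- B flattens A's recursive descent over sliced sublists into one direct enumeration of the
-- size-k combinations (itertools.combinations / math.prod style); same cost, more idiomatic.

-- ===== PORT A =====
-- int(n / d) on Python ints is float division then truncation; on the domain |n| ≤ 2^31 the
-- float result never crosses an integer boundary, so it is exactly toward-zero integer
-- division, ported as PySem.Int.truncdiv.
mutual
  -- literal transliteration of A: the `for i, period in enumerate(periods[:len-targ+1])`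
  -- loop with its `total` accumulator is the helper `recurseGo` (h is only the termination fact).
  def recurse (targ_periods : Int) (periods : List Int) (n_time_steps : Int) (multiplier : Int) : Int :=
    if h : targ_periods > 1 then
      recurseGo targ_periods h periods n_time_steps multiplier
        (PySem.List.enumerate
          (PySem.List.slice periods none (some ((periods.length : Int) - targ_periods + 1))) 0) 0
    else
      periods.foldl
        (fun total period => total + PySem.Int.truncdiv n_time_steps (multiplier * period)) 0
  termination_by (targ_periods.toNat, 1, 0)
  decreasing_by
    apply Prod.Lex.right
    exact Prod.Lex.left _ _ (by omega)

  def recurseGo (targ_periods : Int) (h : targ_periods > 1) (periods : List Int)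
      (n_time_steps : Int) (multiplier : Int) : List (Int × Int) → Int → Int
    | [], total => total
    | (i, period) :: rest, total =>
        recurseGo targ_periods h periods n_time_steps multiplier rest
          (total + recurse (targ_periods - 1)
            (PySem.List.slice periods (some (i + 1)) none) n_time_steps (multiplier * period))
  termination_by pairs _ => (targ_periods.toNat, 0, pairs.length)
  decreasing_by
    · exact Prod.Lex.left _ _ (by omega)
    · apply Prod.Lex.right
      exact Prod.Lex.right _ (by simp)
end

-- ===== PORT B =====
-- itertools.combinations(xs, k) in index order (lexicographic by position)
def pvCombos : Nat → List Int → List (List Int)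
  | 0, _ => [[]]
  | _ + 1, [] => []
  | k + 1, x :: xs => (pvCombos k xs).map (fun c => x :: c) ++ pvCombos (k + 1) xs

-- math.prod
def pvProd (c : List Int) : Int := c.foldl (· * ·) 1

def recurse_alt (targ_periods : Int) (periods : List Int) (n_time_steps : Int) (multiplier : Int) : Int :=
  let k : Nat := if targ_periods > 1 then targ_periods.toNat else 1
  if periods.length < k then 0  -- no size-k subsets
  else
    (pvCombos k periods).foldl
      (fun total c => total + PySem.Int.truncdiv n_time_steps (multiplier * pvProd c)) 0

-- ===== PRECONDITION & SPEC =====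
-- Pre_ excludes exactly the inputs on which A raises ZeroDivisionError: a zero divisor
-- (multiplier = 0 or a zero period) is actually reached iff the list holds at least
-- k = max(targ_periods, 1) elements.
def Pre_recurse (targ_periods : Int) (periods : List Int) (n_time_steps : Int) (multiplier : Int) : Prop :=
  ¬ (max targ_periods 1 ≤ (periods.length : Int) ∧ (multiplier = 0 ∨ (0 : Int) ∈ periods))
instance (targ_periods : Int) (periods : List Int) (n_time_steps : Int) (multiplier : Int) : Decidable (Pre_recurse targ_periods periods n_time_steps multiplier) := by unfold Pre_recurse; infer_instance

def pvWitness_recurse : Int × List Int × Int × Int := (2, [2, 3, 4], 100, 1)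

def Spec_recurse (targ_periods : Int) (periods : List Int) (n_time_steps : Int) (multiplier : Int) (out : Int) : Prop := out = recurse_alt targ_periods periods n_time_steps multiplier
instance (targ_periods : Int) (periods : List Int) (n_time_steps : Int) (multiplier : Int) (out : Int) : Decidable (Spec_recurse targ_periods periods n_time_steps multiplier out) := by unfold Spec_recurse; infer_instance

-- ===== CLAIM =====
def Claim_equal_recurse : Prop := ∀ (targ_periods : Int) (periods : List Int) (n_time_steps : Int) (multiplier : Int), Dom_recurse targ_periods periods n_time_steps multiplier → Pre_recurse targ_periods periods n_time_steps multiplier → Spec_recurse targ_periods periods n_time_steps multiplier (recurse targ_periods periods n_time_steps multiplier)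

-- ===== LEMMAS AND PROOFS =====

-- sum of B's per-combination terms, the common yardstick of both ports
def pvSum (k : Nat) (ps : List Int) (n m : Int) : Int :=
  ((pvCombos k ps).map (fun c => PySem.Int.truncdiv n (m * pvProd c))).sum

-- A's per-suffix sum: for each position, the size-k contribution of the strict suffix
def pvTailSum (k : Nat) (n m : Int) : List Int → Int
  | [] => 0
  | x :: xs => pvSum k xs n (m * x) + pvTailSum k n m xs

theorem pv_foldl_add {α : Type} (f : α → Int) (l : List α) (a : Int) :
    l.foldl (fun tot c => tot + f c) a = a + (l.map f).sum := by
  induction l generalizing a with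
  | nil => simp
  | cons x xs ih => simp [ih]; ring

theorem pvProd_foldl (l : List Int) (a : Int) : l.foldl (· * ·) a = a * pvProd l := by
  induction l generalizing a with
  | nil => simp [pvProd]
  | cons x xs ih =>
    simp only [List.foldl_cons]
    rw [ih (a * x)]
    simp only [pvProd, List.foldl_cons]
    rw [ih (1 * x), show List.foldl (· * ·) 1 xs = pvProd xs from rfl]
    ring

theorem pvProd_cons (x : Int) (l : List Int) : pvProd (x :: l) = x * pvProd l := by
  simp only [pvProd, List.foldl_cons]
  rw [pvProd_foldl, show List.foldl (· * ·) 1 l = pvProd l from rfl]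
  ring

theorem pvCombos_nil_of_lt (k : Nat) (ps : List Int) (h : ps.length < k) :
    pvCombos k ps = [] := by
  induction ps generalizing k with
  | nil => cases k with
    | zero => omega
    | succ k => rfl
  | cons x xs ih =>
    cases k with
    | zero => omega
    | succ k =>
      simp only [pvCombos]
      simp only [List.length_cons] at h
      rw [ih k (by omega), ih (k + 1) (by omega)]
      simp

theorem pvSum_zero_of_lt (k : Nat) (ps : List Int) (n m : Int) (h : ps.length < k) :
    pvSum k ps n m = 0 := by
  simp [pvSum, pvCombos_nil_of_lt k ps h]

theorem pvCombos_one (ps : List Int) : pvCombos 1 ps = ps.map (fun x => [x]) := by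
  induction ps with
  | nil => rfl
  | cons x xs ih => simp [pvCombos, ih]

theorem pvTailSum_zero_of_le (k : Nat) (n m : Int) (ps : List Int) (h : ps.length ≤ k) :
    pvTailSum k n m ps = 0 := by
  induction ps with
  | nil => rfl
  | cons x xs ih =>
    simp only [pvTailSum]
    simp only [List.length_cons] at h
    rw [pvSum_zero_of_lt k xs n (m * x) (by omega), ih (by omega)]
    simp

theorem pvSum_succ (k : Nat) (ps : List Int) (n m : Int) :
    pvSum (k + 1) ps n m = pvTailSum k n m ps := by
  induction ps generalizing m with
  | nil => simp [pvSum, pvCombos, pvTailSum]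
  | cons x xs ih =>
    simp only [pvSum, pvCombos, List.map_append, List.sum_append, List.map_map, pvTailSum]
    rw [← ih m]
    simp only [pvSum]
    congr 1
    apply congrArg
    apply List.map_congr_left
    intro c _
    simp [Function.comp, pvProd_cons]
    ring_nf

theorem recurseGo_eq (t : Int) (h : t > 1) (ps : List Int) (n m : Int)
    (pairs : List (Int × Int)) (total : Int) :
    recurseGo t h ps n m pairs total =
      total + (pairs.map (fun ip =>
        recurse (t - 1) (PySem.List.slice ps (some (ip.1 + 1)) none) n (m * ip.2))).sum := by
  induction pairs generalizing total with
  | nil => simp [recurseGo]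
  | cons p rest ih =>
    obtain ⟨i, period⟩ := p
    simp only [recurseGo, List.map_cons, List.sum_cons, ih]
    ring

theorem pv_clamp_take (xs : List Int) (b : Int) :
    PySem.List.slice xs none (some b) = xs.take (PySem.List.clampIdx xs.length b) := by
  simp [PySem.List.slice]

theorem pv_clampIdx_eq (n : Nat) (b : Int) :
    (PySem.List.clampIdx n b : Int) = max (min (if b < 0 then n + b else b) n) 0 := by
  simp [PySem.List.clampIdx]; split_ifs <;> omega

-- the core bridge: A's enumerate-over-a-prefix sum equals the suffix sum over the whole list,
-- provided the omitted suffixes are too short to contribute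
theorem pv_enum_sum (q : Nat) : ∀ (BIG : List Int) (s k : Nat) (n m : Int), 1 ≤ k →
    (BIG.drop s).length ≤ q + k →
    (((PySem.List.enumerate ((BIG.drop s).take q) (s : Int)).map (fun ip =>
        pvSum k (PySem.List.slice BIG (some (ip.1 + 1)) none) n (m * ip.2))).sum)
      = pvTailSum k n m (BIG.drop s) := by
  induction q with
  | zero =>
    intro BIG s k n m hk hl
    simp only [List.take_zero, PySem.List.enumerate, List.map_nil, List.sum_nil]
    rw [pvTailSum_zero_of_le k n m _ (by omega)]
  | succ q ih =>
    intro BIG s k n m hk hl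
    cases hd : BIG.drop s with
    | nil =>
      simp only [List.take_nil, PySem.List.enumerate, List.map_nil, List.sum_nil, pvTailSum]
    | cons x xs =>
      have hxs : xs = BIG.drop (s + 1) := by
        have h2 : (BIG.drop s).tail = xs := by rw [hd]; rfl
        rw [List.tail_drop] at h2
        exact h2.symm
      rw [List.take_succ_cons, PySem.List.enumerate_cons, List.map_cons, List.sum_cons]
      have hslice : PySem.List.slice BIG (some ((s : Int) + 1)) none = BIG.drop (s + 1) := by
        have : ((s : Int) + 1) = ((s + 1 : Nat) : Int) := by push_cast; ring
        rw [this, PySem.List.slice_from_natCast]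
      have hlen : (BIG.drop (s + 1)).length ≤ q + k := by
        rw [← hxs]
        have : (BIG.drop s).length = xs.length + 1 := by rw [hd]; simp
        omega
      have hih := ih BIG (s + 1) k n m hk hlen
      rw [← hxs] at hih
      push_cast at hih
      simp only [pvTailSum, hslice, ← hxs]
      rw [hih]

-- main characterisation: A computes B's combination sum
theorem recurse_eq_pvSum : ∀ (N : Nat) (t : Int), t.toNat = N → ∀ (ps : List Int) (n m : Int),
    recurse t ps n m = pvSum (if t > 1 then t.toNat else 1) ps n m := by
  intro N
  induction N using Nat.strong_induction_on with
  | _ N ih =>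
    intro t htN ps n m
    by_cases ht : t > 1
    · rw [recurse]
      simp only [ht, dif_pos, if_pos]
      have hk' : ∀ ps' n' m', recurse (t - 1) ps' n' m' = pvSum (t.toNat - 1) ps' n' m' := by
        intro ps' n' m'
        have h1 : (t - 1).toNat < N := by omega
        rw [ih _ h1 (t - 1) rfl ps' n' m']
        congr 1
        by_cases h2 : t - 1 > 1
        · rw [if_pos h2]; omega
        · rw [if_neg h2]; omega
      rw [recurseGo_eq]
      simp only [hk', zero_add]
      -- rewrite the slice prefix as a take
      rw [pv_clamp_take]
      set q : Nat := PySem.List.clampIdx ps.length ((ps.length : Int) - t + 1) with hq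
      have hqv := pv_clampIdx_eq ps.length ((ps.length : Int) - t + 1)
      rw [← hq] at hqv
      have hlen : ps.length ≤ q + (t.toNat - 1) := by
        by_cases hb : ((ps.length : Int) - t + 1) < 0
        · omega
        · have : (q : Int) = (ps.length : Int) - t + 1 ∨ (q : Int) = (ps.length : Int) := by
            rw [hqv]; split_ifs <;> omega
          omega
      have := pv_enum_sum q ps 0 (t.toNat - 1) n m (by omega) (by simpa using hlen)
      simp only [List.drop_zero, Nat.cast_zero] at this
      rw [this]
      rw [← pvSum_succ]
      congr 1
      omega
    · rw [recurse]
      simp only [ht, dif_neg, if_neg, not_false_iff]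
      rw [pv_foldl_add, zero_add]
      simp only [pvSum, pvCombos_one, List.map_map]
      congr 1
      apply List.map_congr_left
      intro x _
      simp [Function.comp, pvProd]

theorem recurse_alt_eq_pvSum (t : Int) (ps : List Int) (n m : Int) :
    recurse_alt t ps n m = pvSum (if t > 1 then t.toNat else 1) ps n m := by
  rw [recurse_alt]
  set k : Nat := if t > 1 then t.toNat else 1 with hk
  by_cases hlt : ps.length < k
  · rw [if_pos hlt, pvSum_zero_of_lt k ps n m hlt]
  · rw [if_neg hlt, pv_foldl_add, zero_add]
    rfl

-- ===== VERDICT =====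
theorem recurse_spec : Claim_equal_recurse := by
  intro t ps n m _ _
  unfold Spec_recurse
  rw [recurse_eq_pvSum t.toNat t rfl ps n m, recurse_alt_eq_pvSum]
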